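-- pv_equiv track=rewrite | github.com/dong-river/LLM_unlearning | exp/create_exp_su_early_stop.py | create_experiment_commands
-- ===== SOURCE A (Python) =====
-- import itertools
--
-- def create_experiment_commands(dic):
--     commands = []
--     keys, values = zip(*dic.items())
--     experiments = [dict(zip(keys, v)) for v in itertools.product(*values)]
--
--     for experiment in experiments:
--         command = 'python main.py '
--         for key, value in experiment.items():
--             command += f'--{key} {value} '
--         commands.append(command)
--     return commands
-- ===== SOURCE B (Python) =====
-- def create_experiment_commands(dic):
--     commands = ['python main.py ']
--     for key, values in dic.items():
--         commands = [c + f'--{key} {value} ' for c in commands for value in values]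
--     return commands
-- ===== Notes on version B (the rewrite author's own statement) =====
-- stated objective: simpler
-- what changed: Drops itertools.product and the intermediate list of experiment dicts: the commands are built directly by one fold over the keys, extending every partial command string by each value of the current key (ordering matches product because later keys vary fastest).
import Mathlib
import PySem

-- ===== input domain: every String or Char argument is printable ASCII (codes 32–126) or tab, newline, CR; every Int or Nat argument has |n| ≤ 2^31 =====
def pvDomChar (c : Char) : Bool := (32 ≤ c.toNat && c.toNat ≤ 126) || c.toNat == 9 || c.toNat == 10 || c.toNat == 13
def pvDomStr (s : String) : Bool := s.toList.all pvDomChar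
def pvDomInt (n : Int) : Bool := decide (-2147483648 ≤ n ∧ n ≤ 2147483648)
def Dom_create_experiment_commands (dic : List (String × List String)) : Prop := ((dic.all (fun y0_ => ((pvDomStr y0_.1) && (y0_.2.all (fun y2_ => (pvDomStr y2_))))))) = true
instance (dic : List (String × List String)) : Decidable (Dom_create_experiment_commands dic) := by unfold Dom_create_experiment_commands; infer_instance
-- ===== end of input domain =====

-- B drops itertools.product and the experiment-dict list: one fold over the keys extends every
-- partial command by each value of the current key (simpler decomposition, same cost).
-- ===== PORT A =====
-- itertools.product(*values): leftmost iterable varies slowest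
def pyProductA : List (List String) → List (List String)
  | [] => [[]]
  | vs :: rest => vs.flatMap (fun x => (pyProductA rest).map (fun t => x :: t))

def create_experiment_commands (dic : List (String × List String)) : List String :=
  let keys := dic.map Prod.fst
  let values := dic.map Prod.snd
  let experiments := (pyProductA values).map (fun v => PySem.Dict.ofList (keys.zip v))
  experiments.foldl
    (fun commands experiment =>
      commands ++
        [experiment.items.foldl
          (fun command kv => command ++ "--" ++ kv.1 ++ " " ++ kv.2 ++ " ")
          "python main.py "])
    []

-- ===== PORT B =====
def create_experiment_commands_alt (dic : List (String × List String)) : List String :=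
  dic.foldl
    (fun commands kv =>
      commands.flatMap (fun c => kv.2.map (fun value => c ++ "--" ++ kv.1 ++ " " ++ value ++ " ")))
    ["python main.py "]

-- ===== PRECONDITION & SPEC =====
-- Pre_ excludes the empty dict, on which the Python A raises ValueError (unpacking zip(*{}.items())).
-- The Nodup conjunct only rules out association lists that do not represent a Python dict
-- (a dict never holds duplicate keys), not any input the Python A accepts.
def Pre_create_experiment_commands (dic : List (String × List String)) : Prop :=
  dic ≠ [] ∧ (dic.map Prod.fst).Nodup
instance (dic : List (String × List String)) : Decidable (Pre_create_experiment_commands dic) := by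
  unfold Pre_create_experiment_commands; infer_instance

def pvWitness_create_experiment_commands : (List (String × List String)) :=
  [("lr", ["0.1", "0.01"]), ("seed", ["1"])]

def Spec_create_experiment_commands (dic : List (String × List String)) (out : List String) : Prop :=
  out = create_experiment_commands_alt dic
instance (dic : List (String × List String)) (out : List String) :
    Decidable (Spec_create_experiment_commands dic out) := by
  unfold Spec_create_experiment_commands; infer_instance

-- ===== CLAIM (what is proved, stated in full; the proofs are below) =====
def Claim_equal_create_experiment_commands : Prop :=
  ∀ (dic : List (String × List String)), Dom_create_experiment_commands dic →
    Pre_create_experiment_commands dic →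
      Spec_create_experiment_commands dic (create_experiment_commands dic)

-- ===== LEMMAS AND PROOFS =====

-- the per-key step both programs append to a command
def pvStep (c : String) (kv : String × String) : String :=
  c ++ "--" ++ kv.1 ++ " " ++ kv.2 ++ " "

-- B's whole loop body, named for the lemmas
def pvExtend (commands : List String) (kv : String × List String) : List String :=
  commands.flatMap (fun c => kv.2.map (fun value => pvStep c (kv.1, value)))

lemma pvAlt_eq_foldl (dic : List (String × List String)) :
    create_experiment_commands_alt dic = dic.foldl pvExtend ["python main.py "] := rfl

-- dict(zip(keys, v)) keeps exactly the zipped pairs when the keys are distinct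
lemma pvItems_ofList (ps : List (String × String)) (h : (ps.map Prod.fst).Nodup) :
    (PySem.Dict.ofList ps).items = ps := by
  unfold PySem.Dict.ofList PySem.Dict.update
  rw [show (fun (d : PySem.Dict String String) (p : String × String) => d.insert p.1 p.2)
      = (fun d p => d.insert (Prod.fst p) (Prod.snd p)) from rfl]
  rw [PySem.Dict.items_foldl_insert_fresh ps Prod.fst Prod.snd PySem.Dict.empty
      (by intro a _; simp [PySem.Dict.contains_empty]) h]
  simp [PySem.Dict.empty]

lemma pvProduct_length (vss : List (List String)) (v : List String)
    (hv : v ∈ pyProductA vss) : v.length = vss.length := by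
  induction vss generalizing v with
  | nil => simp [pyProductA] at hv; simp [hv]
  | cons vs rest ih =>
    simp [pyProductA, List.mem_flatMap] at hv
    obtain ⟨x, _, t, ht, rfl⟩ := hv
    simp [ih t ht]

-- B's fold maps append of seeds to append of results
lemma pvFold_append (dic : List (String × List String)) (a b : List String) :
    dic.foldl pvExtend (a ++ b) = dic.foldl pvExtend a ++ dic.foldl pvExtend b := by
  induction dic generalizing a b with
  | nil => rfl
  | cons kv rest ih =>
    simp only [List.foldl_cons]
    rw [show pvExtend (a ++ b) kv = pvExtend a kv ++ pvExtend b kv by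
          simp [pvExtend, List.flatMap_append], ih]

lemma pvFold_map (dic : List (String × List String)) (xs : List String) :
    dic.foldl pvExtend xs = xs.flatMap (fun c => dic.foldl pvExtend [c]) := by
  induction xs with
  | nil =>
    induction dic with
    | nil => rfl
    | cons kv rest ih => simp only [List.foldl_cons]; simpa [pvExtend] using ih
  | cons c cs ih =>
    have : (c :: cs) = [c] ++ cs := rfl
    rw [this, pvFold_append, ih]; simp

-- main invariant: A's map-over-product from a seed equals B's fold from that seed
lemma pvMain (dic : List (String × List String)) (acc : String) :
    (pyProductA (dic.map Prod.snd)).map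
        (fun v => ((dic.map Prod.fst).zip v).foldl pvStep acc)
      = dic.foldl pvExtend [acc] := by
  induction dic generalizing acc with
  | nil => simp [pyProductA]
  | cons kv rest ih =>
    simp only [List.map_cons, pyProductA, List.map_flatMap, List.foldl_cons]
    have hstep : pvExtend [acc] kv = kv.2.map (fun x => pvStep acc (kv.1, x)) := by
      simp [pvExtend]
    rw [hstep, pvFold_map, List.flatMap_map]
    congr 1
    funext x
    rw [List.map_map]
    calc (pyProductA (rest.map Prod.snd)).map
            ((fun v => ((kv.1 :: rest.map Prod.fst).zip v).foldl pvStep acc) ∘ (fun t => x :: t))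
        = (pyProductA (rest.map Prod.snd)).map
            (fun t => ((rest.map Prod.fst).zip t).foldl pvStep (pvStep acc (kv.1, x))) := by
          simp [List.zip_cons_cons]
      _ = rest.foldl pvExtend [pvStep acc (kv.1, x)] := ih _

-- ===== VERDICT (by name: the statement is the Claim_ definition above) =====
theorem create_experiment_commands_spec : Claim_equal_create_experiment_commands := by
  intro dic _ hpre
  unfold Spec_create_experiment_commands
  unfold create_experiment_commands
  simp only []
  rw [PySem.List.foldl_append_singleton_eq_map]
  rw [List.nil_append, List.map_map]
  rw [pvAlt_eq_foldl, ← pvMain dic "python main.py "]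
  apply List.map_congr_left
  intro v hv
  have hlen : v.length = (dic.map Prod.snd).length := pvProduct_length _ _ hv
  have hfst : (((dic.map Prod.fst).zip v).map Prod.fst) = dic.map Prod.fst := by
    apply List.map_fst_zip
    simp [hlen]
  rw [Function.comp_apply, pvItems_ofList _ (by rw [hfst]; exact hpre.2)]
  rfl
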